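-- pv_equiv track=rewrite | github.com/johnwhitington/python-from-the-very-beginning-examples-and-exercises | exercises/Chapter08/exercises.py | safe_union
-- ===== SOURCE A (Python) =====
-- def safe_union(a, b):
--     c = {}
--     for k, v in a.items():
--         c[k] = v
--     for k, v in b.items():
--         if k in c:
--             raise KeyError
--         else:
--             c[k] = v
--     return c
-- ===== SOURCE B (Python) =====
-- def safe_union(a, b):
--     # Check-free merge: detect collisions up front with a set intersection,
--     # then merge unconditionally.
--     if set(a) & set(b):
--         raise KeyError
--     c = dict(a)
--     c.update(b)
--     return c
-- ===== Notes on version B (the rewrite author's own statement) =====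
-- stated objective: simpler
-- what changed: Replaces the per-key membership check inside the merge loop with a single up-front set intersection of the key sets followed by an unconditional dict(a)+update(b) merge.
import Mathlib
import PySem

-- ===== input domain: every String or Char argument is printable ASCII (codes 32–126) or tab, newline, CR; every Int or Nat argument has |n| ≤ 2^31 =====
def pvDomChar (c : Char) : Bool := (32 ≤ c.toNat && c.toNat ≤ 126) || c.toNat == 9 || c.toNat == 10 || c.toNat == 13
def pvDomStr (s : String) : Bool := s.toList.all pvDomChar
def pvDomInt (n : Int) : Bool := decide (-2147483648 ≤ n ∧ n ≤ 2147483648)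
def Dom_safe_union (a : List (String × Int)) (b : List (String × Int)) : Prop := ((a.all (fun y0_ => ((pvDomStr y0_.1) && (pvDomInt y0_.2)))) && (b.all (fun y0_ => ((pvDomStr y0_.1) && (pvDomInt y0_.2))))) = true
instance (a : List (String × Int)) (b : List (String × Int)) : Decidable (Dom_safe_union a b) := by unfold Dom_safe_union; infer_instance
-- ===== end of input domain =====

-- B replaces A's per-key membership check inside the merge loop with one up-front
-- set intersection of the key sets and an unconditional merge (objective: simpler).

-- ===== PORT A =====
def safe_union (a : List (String × Int)) (b : List (String × Int)) : List (String × Int) :=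
  -- c = {}; for k, v in a.items(): c[k] = v
  let c := a.foldl (fun c p => c.insert p.1 p.2) (PySem.Dict.empty : PySem.Dict String Int)
  -- for k, v in b.items(): if k in c: raise KeyError else: c[k] = v
  -- (the KeyError branch is excluded by Pre_safe_union; the port leaves c unchanged there)
  let c := b.foldl (fun c p => if c.contains p.1 then c else c.insert p.1 p.2) c
  c.items

-- ===== PORT B =====
def safe_union_alt (a : List (String × Int)) (b : List (String × Int)) : List (String × Int) :=
  -- if set(a) & set(b): raise KeyError   (excluded by Pre_safe_union; the port returns [])
  if PySem.Set.inter (PySem.Set.ofList (a.map Prod.fst)) (PySem.Set.ofList (b.map Prod.fst)) ≠ [] then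
    []
  else
    -- c = dict(a); c.update(b); return c
    let c := PySem.Dict.ofList a
    let c := PySem.Dict.update c b
    c.items

-- ===== PRECONDITION & SPEC =====
-- Pre_ excludes exactly the inputs on which the Python A raises KeyError: a key of b
-- that is already present, either as a key of a or as an earlier key of b.
def Pre_safe_union (a : List (String × Int)) (b : List (String × Int)) : Prop :=
  (b.map Prod.fst).Nodup ∧ ∀ k ∈ b.map Prod.fst, k ∉ a.map Prod.fst
instance (a : List (String × Int)) (b : List (String × Int)) : Decidable (Pre_safe_union a b) := by unfold Pre_safe_union; infer_instance

def pvWitness_safe_union : (List (String × Int)) × (List (String × Int)) :=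
  ([("x", 1), ("y", 2)], [("z", 3)])

def Spec_safe_union (a : List (String × Int)) (b : List (String × Int)) (out : List (String × Int)) : Prop := out = safe_union_alt a b
instance (a : List (String × Int)) (b : List (String × Int)) (out : List (String × Int)) : Decidable (Spec_safe_union a b out) := by unfold Spec_safe_union; infer_instance

-- ===== CLAIM (what is proved, stated in full; the proofs are below) =====
def Claim_equal_safe_union : Prop := ∀ (a : List (String × Int)) (b : List (String × Int)), Dom_safe_union a b → Pre_safe_union a b → Spec_safe_union a b (safe_union a b)

-- ===== LEMMAS AND PROOFS =====

-- A's conditional merge loop over fresh, distinct keys is the unconditional merge loop.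
theorem cond_foldl_eq_foldl_insert (b : List (String × Int)) (d : PySem.Dict String Int)
    (hnd : (b.map Prod.fst).Nodup) (hfree : ∀ k ∈ b.map Prod.fst, d.contains k = false) :
    b.foldl (fun c p => if c.contains p.1 then c else c.insert p.1 p.2) d
      = b.foldl (fun c p => c.insert p.1 p.2) d := by
  induction b generalizing d with
  | nil => rfl
  | cons p t ih =>
    simp only [List.map_cons, List.nodup_cons] at hnd
    have hp : d.contains p.1 = false := hfree p.1 (by simp)
    simp only [List.foldl_cons, hp, Bool.false_eq_true, if_false]
    exact ih (d.insert p.1 p.2) hnd.2 (fun k hk => by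
      rw [PySem.Dict.contains_insert]
      simp only [Bool.or_eq_false_iff]
      exact ⟨by rw [beq_eq_false_iff_ne]; exact fun h => hnd.1 (h ▸ hk),
             hfree k (by simp [hk])⟩)

-- keys of the dict built by inserting a's items are exactly a's keys (as a set).
theorem foldl_insert_not_contains (a : List (String × Int)) (k : String)
    (hk : k ∉ a.map Prod.fst) :
    (a.foldl (fun c p => c.insert p.1 p.2) (PySem.Dict.empty : PySem.Dict String Int)).contains k = false := by
  rw [PySem.Dict.contains_eq_decide_mem_keys]
  rw [PySem.Dict.keys_foldl_insert_key]
  simp only [PySem.Dict.keys_empty, decide_eq_false_iff_not]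
  intro hmem
  rw [PySem.Set.update_nil_left, PySem.Set.mem_ofList] at hmem
  exact hk hmem

-- ===== VERDICT (by name: the statement is the Claim_ definition above) =====
theorem safe_union_spec : Claim_equal_safe_union := by
  intro a b _ hpre
  obtain ⟨hnd, hdisj⟩ := hpre
  unfold Spec_safe_union safe_union safe_union_alt
  have hinter : PySem.Set.inter (PySem.Set.ofList (a.map Prod.fst)) (PySem.Set.ofList (b.map Prod.fst)) = [] := by
    rw [List.eq_nil_iff_forall_not_mem]
    intro k hk
    rw [PySem.Set.mem_inter, PySem.Set.mem_ofList, PySem.Set.mem_ofList] at hk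
    exact hdisj k hk.2 hk.1
  rw [if_neg (by simp [hinter])]
  show (b.foldl (fun c p => if c.contains p.1 then c else c.insert p.1 p.2)
          (a.foldl (fun c p => c.insert p.1 p.2) (PySem.Dict.empty : PySem.Dict String Int))).items
      = ((PySem.Dict.ofList a).update b).items
  rw [cond_foldl_eq_foldl_insert b _ hnd
    (fun k hk => foldl_insert_not_contains a k (fun h => hdisj k hk h))]
  rfl
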